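-- pv_equiv track=rewrite | github.com/0x4D44/mdhearts | tools/analyze_block_shooter.py | detect_moon
-- ===== SOURCE A (Python) =====
-- from typing import Dict, Iterable, List, Optional, Tuple
--
-- def detect_moon(points: Dict[str, int]) -> Tuple[Optional[str], Optional[str]]:
--     values = sorted(points.values())
--     if values == [0, 26, 26, 26]:
--         shooter = next(seat for seat, pts in points.items() if pts == 0)
--         return shooter, "classic"
--     if values == [0, 0, 0, 26]:
--         shooter = next(seat for seat, pts in points.items() if pts == 26)
--         return shooter, "inverted"
--     return None, None
-- ===== SOURCE B (Python) =====
-- from typing import Dict, Optional, Tuple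
--
--
-- def detect_moon(points: Dict[str, int]) -> Tuple[Optional[str], Optional[str]]:
--     zeros = sixes = others = 0
--     zero_seat = six_seat = None
--     for seat, pts in points.items():
--         if pts == 0:
--             if zero_seat is None:
--                 zero_seat = seat
--             zeros += 1
--         elif pts == 26:
--             if six_seat is None:
--                 six_seat = seat
--             sixes += 1
--         else:
--             others += 1
--     if others == 0 and zeros + sixes == 4:
--         if zeros == 1:
--             return zero_seat, "classic"
--         if sixes == 1:
--             return six_seat, "inverted"
--     return None, None
-- ===== Notes on version B (the rewrite author's own statement) =====
-- stated objective: simpler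
-- what changed: Replaces the sort of the point values plus two fixed-list comparisons by a single counting pass that tallies 0s, 26s, other values, and the first seat with each extremal score, then classifies from the counts.
import Mathlib
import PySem

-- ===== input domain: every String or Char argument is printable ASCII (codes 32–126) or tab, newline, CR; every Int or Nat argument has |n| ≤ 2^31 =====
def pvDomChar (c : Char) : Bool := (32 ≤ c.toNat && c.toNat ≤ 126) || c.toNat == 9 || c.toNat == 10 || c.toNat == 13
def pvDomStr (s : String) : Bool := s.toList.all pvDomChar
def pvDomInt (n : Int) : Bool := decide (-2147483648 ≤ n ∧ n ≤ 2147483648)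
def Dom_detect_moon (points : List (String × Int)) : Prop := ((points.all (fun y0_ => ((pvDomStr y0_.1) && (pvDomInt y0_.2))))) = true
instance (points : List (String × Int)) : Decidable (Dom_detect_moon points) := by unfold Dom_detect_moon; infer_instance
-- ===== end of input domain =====

-- B replaces A's sort + fixed-list comparisons by one counting pass over the values; objective: simpler.

-- ===== PORT A =====
-- values = sorted(points.values()); compare against [0,26,26,26] / [0,0,0,26];
-- next(seat for seat, pts in points.items() if pts == …) = first matching seat (guards make it exist).
def detect_moon (points : List (String × Int)) : Option String × Option String :=
  let values := PySem.List.sorted (points.map Prod.snd) (fun x => x) false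
  if values = [0, 26, 26, 26] then
    ((points.find? (fun p => p.2 == 0)).map Prod.fst, some "classic")
  else if values = [0, 0, 0, 26] then
    ((points.find? (fun p => p.2 == 26)).map Prod.fst, some "inverted")
  else
    (none, none)

-- ===== PORT B =====
-- one pass: count 0s, 26s and other values, remember the first seat scoring 0 and the first scoring 26
def bStep (s : Int × Int × Int × Option String × Option String) (p : String × Int) :
    Int × Int × Int × Option String × Option String :=
  match s with
  | (z, x, o, zs, xs) =>
    if p.2 == 0 then (z + 1, x, o, zs.or (some p.1), xs)
    else if p.2 == 26 then (z, x + 1, o, zs, xs.or (some p.1))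
    else (z, x, o + 1, zs, xs)

def detect_moon_alt (points : List (String × Int)) : Option String × Option String :=
  match points.foldl bStep (0, 0, 0, none, none) with
  | (z, x, o, zs, xs) =>
    if o = 0 ∧ z + x = 4 then
      if z = 1 then (zs, some "classic")
      else if x = 1 then (xs, some "inverted")
      else (none, none)
    else (none, none)

-- ===== PRECONDITION & SPEC =====
def Spec_detect_moon (points : List (String × Int)) (out : Option String × Option String) : Prop := out = detect_moon_alt points
instance (points : List (String × Int)) (out : Option String × Option String) : Decidable (Spec_detect_moon points out) := by unfold Spec_detect_moon; infer_instance

-- ===== CLAIM (what is proved, stated in full; the proofs are below) =====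
def Claim_equal_detect_moon : Prop := ∀ (points : List (String × Int)), Dom_detect_moon points → Spec_detect_moon points (detect_moon points)

-- ===== LEMMAS AND PROOFS =====

def pvOther (v : Int) : Bool := !(v == 0) && !(v == 26)

theorem fold_spec (points : List (String × Int)) (z x o : Int) (zs xs : Option String) :
    points.foldl bStep (z, x, o, zs, xs) =
      (z + ((points.map Prod.snd).count 0 : Int),
       x + ((points.map Prod.snd).count 26 : Int),
       o + (((points.map Prod.snd).countP pvOther : Nat) : Int),
       zs.or ((points.find? (fun p => p.2 == 0)).map Prod.fst),
       xs.or ((points.find? (fun p => p.2 == 26)).map Prod.fst)) := by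
  induction points generalizing z x o zs xs with
  | nil => simp [List.count]
  | cons p t ih =>
    by_cases h0 : p.2 = 0
    · simp [List.foldl, bStep, h0, ih, List.find?_cons, List.count_cons, pvOther]
      omega
    · by_cases h26 : p.2 = 26
      · simp [List.foldl, bStep, h0, h26, ih, List.find?_cons, List.count_cons, pvOther]
        omega
      · simp [List.foldl, bStep, h0, h26, ih, List.find?_cons, List.count_cons, pvOther]
        omega

theorem perm_counts (l : List Int) (t : List Int)
    (hta : t.count 0 = l.count 0) (htb : t.count 26 = l.count 26)
    (hall : ∀ v ∈ t, v = 0 ∨ v = 26)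
    (hother : l.countP pvOther = 0) :
    l.Perm t := by
  rw [List.perm_iff_count]
  intro c
  by_cases hca : c = 0
  · subst hca; omega
  · by_cases hcb : c = 26
    · subst hcb; omega
    · have ht : t.count c = 0 := by
        rw [List.count_eq_zero]
        intro hc
        rcases hall c hc with rfl | rfl <;> simp_all
      have hl : l.count c ≤ l.countP pvOther := by
        unfold List.count
        apply List.countP_mono_left
        intro v _ hv
        simp at hv
        subst hv
        simp [pvOther, hca, hcb]
      omega

theorem sorted_char (l : List Int) (t : List Int) (ht : t.Pairwise (· ≤ ·)) :
    (PySem.List.sorted l (fun x => x) false = t ↔ l.Perm t) := by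
  constructor
  · intro h
    have hp := PySem.List.sorted_perm l (fun x : Int => x) false
    rw [h] at hp
    exact hp.symm
  · intro h
    have h2 : PySem.List.sorted t (fun x : Int => x) false = t :=
      PySem.List.sorted_eq_self_of_pairwise t (fun x => x) ht
    rw [PySem.List.sorted_eq_sorted_of_perm l t (fun x => x) (fun _ _ h => h) h, h2]

-- ===== VERDICT (by name: the statement is the Claim_ definition above) =====
theorem detect_moon_spec : Claim_equal_detect_moon := by
  intro points _
  unfold Spec_detect_moon detect_moon detect_moon_alt
  rw [fold_spec]
  simp only [zero_add, Option.none_or]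
  set vals := points.map Prod.snd with hv
  have hc : PySem.List.sorted vals (fun x => x) false = [0, 26, 26, 26] ↔
      vals.Perm [0, 26, 26, 26] := sorted_char _ _ (by decide)
  have hi : PySem.List.sorted vals (fun x => x) false = [0, 0, 0, 26] ↔
      vals.Perm [0, 0, 0, 26] := sorted_char _ _ (by decide)
  by_cases h1 : PySem.List.sorted vals (fun x => x) false = [0, 26, 26, 26]
  · have hp := hc.mp h1
    have h0 : vals.count 0 = 1 := by rw [hp.count_eq]; decide
    have h26 : vals.count 26 = 3 := by rw [hp.count_eq]; decide
    have hoth : vals.countP pvOther = 0 := by rw [hp.countP_eq]; decide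
    simp only [h1, if_true, h0, h26, hoth]
    norm_num
  · by_cases h2 : PySem.List.sorted vals (fun x => x) false = [0, 0, 0, 26]
    · have hp := hi.mp h2
      have h0 : vals.count 0 = 3 := by rw [hp.count_eq]; decide
      have h26 : vals.count 26 = 1 := by rw [hp.count_eq]; decide
      have hoth : vals.countP pvOther = 0 := by rw [hp.countP_eq]; decide
      simp only [h1, h2, if_true, h0, h26, hoth]
      norm_num
    · simp only [h1, h2, if_false]
      split_ifs with hb hz hx
      · exfalso
        apply h1
        rw [hc]
        obtain ⟨ho, hsum⟩ := hb
        have ho' : vals.countP pvOther = 0 := by exact_mod_cast ho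
        have h0' : vals.count 0 = 1 := by exact_mod_cast hz
        have h26' : vals.count 26 = 3 := by omega
        refine perm_counts vals [0, 26, 26, 26] ?_ ?_ (by decide) ho'
        · rw [h0']; decide
        · rw [h26']; decide
      · exfalso
        apply h2
        rw [hi]
        obtain ⟨ho, hsum⟩ := hb
        have ho' : vals.countP pvOther = 0 := by exact_mod_cast ho
        have h26' : vals.count 26 = 1 := by exact_mod_cast hx
        have h0' : vals.count 0 = 3 := by omega
        refine perm_counts vals [0, 0, 0, 26] ?_ ?_ (by decide) ho'
        · rw [h0']; decide
        · rw [h26']; decide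
      · rfl
      · rfl
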